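-- pv_equiv track=rewrite | github.com/pypi-data/pypi-mirror-375 | packages/fluid-labels/fluid_labels-2.1.15.tar.gz/fluid_labels-2.1.15/labels/parsers/cataloger/swift/package.py | is_stable_package_version
-- ===== SOURCE A (Python) =====
-- def is_stable_package_version(version: str) -> bool:
--     unstable_identifiers = (
--         "alpha",
--         "beta",
--         "rc",
--         "next",
--         "preview",
--         "pre",
--         "dev",
--         "snapshot",
--         "canary",
--         "nightly",
--     )
--
--     return not any(identifier in version for identifier in unstable_identifiers)
-- ===== SOURCE B (Python) =====
-- _UNSTABLE = ("alpha", "beta", "rc", "next", "preview", "pre", "dev", "snapshot", "canary", "nightly")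
--
--
-- def is_stable_package_version(version: str) -> bool:
--     # single left-to-right pass: at each position, check whether any
--     # unstable identifier starts there
--     for i in range(len(version)):
--         if any(version.startswith(ident, i) for ident in _UNSTABLE):
--             return False
--     return True
-- ===== Notes on version B (the rewrite author's own statement) =====
-- stated objective: alternative
-- what changed: Replaced the ten independent whole-string substring scans with a single left-to-right pass over the string that tests at each position whether any unstable identifier starts there.
import Mathlib
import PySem

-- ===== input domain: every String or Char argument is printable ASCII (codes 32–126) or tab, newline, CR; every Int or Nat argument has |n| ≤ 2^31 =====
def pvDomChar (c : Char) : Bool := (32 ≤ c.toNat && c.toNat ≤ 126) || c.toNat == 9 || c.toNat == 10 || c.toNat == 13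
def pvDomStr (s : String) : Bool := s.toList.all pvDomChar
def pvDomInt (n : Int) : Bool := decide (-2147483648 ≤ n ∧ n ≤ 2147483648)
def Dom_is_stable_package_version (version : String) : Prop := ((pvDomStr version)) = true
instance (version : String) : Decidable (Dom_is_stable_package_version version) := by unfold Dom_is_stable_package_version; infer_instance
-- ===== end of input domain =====

-- B replaces A's ten independent substring scans by one left-to-right pass
-- testing at each position whether an identifier starts there (objective: alternative).

-- ===== PORT A =====
def pvUnstableIdentifiers : List String :=
  ["alpha", "beta", "rc", "next", "preview", "pre", "dev", "snapshot", "canary", "nightly"]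

def is_stable_package_version (version : String) : Bool :=
  !(pvUnstableIdentifiers.any (fun identifier => PySem.Str.isIn identifier version))

-- ===== PORT B =====
def pvUnstableChars : List (List Char) :=
  pvUnstableIdentifiers.map String.toList

-- Source B's position loop on the character list: each step checks the identifiers
-- at the current position (startswith at i = isPrefixOf on the suffix), then moves on
def pvScan : List Char → Bool
  | [] => true
  | c :: rest =>
      if pvUnstableChars.any (fun ident => ident.isPrefixOf (c :: rest)) then false
      else pvScan rest

def is_stable_package_version_alt (version : String) : Bool :=
  pvScan version.toList

-- ===== PRECONDITION & SPEC =====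
def Spec_is_stable_package_version (version : String) (out : Bool) : Prop := out = is_stable_package_version_alt version
instance (version : String) (out : Bool) : Decidable (Spec_is_stable_package_version version out) := by unfold Spec_is_stable_package_version; infer_instance

-- ===== CLAIM (what is proved, stated in full; the proofs are below) =====
def Claim_equal_is_stable_package_version : Prop := ∀ (version : String), Dom_is_stable_package_version version → Spec_is_stable_package_version version (is_stable_package_version version)

-- ===== LEMMAS AND PROOFS =====

-- the scan returns true iff no identifier occurs as an infix
theorem pvScan_eq_true_iff (l : List Char) :
    pvScan l = true ↔ ∀ id ∈ pvUnstableChars, ¬ id <:+: l := by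
  induction l with
  | nil =>
    simp only [pvScan, true_iff]
    intro id hid hinf
    have hne : id ≠ [] := by
      fin_cases hid <;> simp
    exact hne (List.eq_nil_of_infix_nil hinf)
  | cons c rest ih =>
    simp only [pvScan]
    split_ifs with h
    · simp only [false_iff, not_forall]
      rcases List.any_eq_true.mp h with ⟨id, hid, hpre⟩
      exact ⟨id, hid, by
        simp only [not_not]
        exact (List.isPrefixOf_iff_prefix.mp hpre).isInfix⟩
    · rw [ih]
      constructor
      · intro hall id hid hinf
        rcases List.infix_cons_iff.mp hinf with hpre | hinf'
        · have hp : (fun ident => ident.isPrefixOf (c :: rest)) id = true :=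
            List.isPrefixOf_iff_prefix.mpr hpre
          exact absurd (List.any_eq_true.mpr ⟨id, hid, hp⟩) h
        · exact hall id hid hinf'
      · intro hall id hid hinf
        exact hall id hid (List.infix_cons hinf)

-- ===== VERDICT (by name: the statement is the Claim_ definition above) =====
theorem is_stable_package_version_spec : Claim_equal_is_stable_package_version := by
  intro version _
  unfold Spec_is_stable_package_version is_stable_package_version is_stable_package_version_alt
  by_cases hb : pvScan version.toList = true
  · rw [hb]
    simp only [Bool.not_eq_eq_eq_not, Bool.not_true, List.any_eq_false]
    intro id hid hin
    rw [PySem.Str.isIn_eq] at hin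
    have hinf := (PySem.Chars.isIn_iff_infix _ _).mp hin
    exact (pvScan_eq_true_iff version.toList).mp hb id.toList
      (List.mem_map_of_mem hid) hinf
  · rw [Bool.eq_false_iff.mpr hb]
    simp only [Bool.not_eq_false']
    rw [pvScan_eq_true_iff] at hb
    push Not at hb
    rcases hb with ⟨id, hid, hinf⟩
    rcases List.mem_map.mp hid with ⟨s, hs, rfl⟩
    exact List.any_eq_true.mpr ⟨s, hs, by rw [PySem.Str.isIn_eq]; exact (PySem.Chars.isIn_iff_infix _ _).mpr hinf⟩
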